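-- pv_equiv track=rewrite | github.com/Mastermindmani88897/Coding_platforms | Difficulty: Hard/Chocolates Pickup/chocolates-pickup.py | maxChocolate
-- ===== SOURCE A (Python) =====
-- def maxChocolate(grid):
--     n = len(grid)
--     m = len(grid[0])
--
--     dp = [[[-1]*m for _ in range(m)] for _ in range(n)]
--
--     for j1 in range(m):
--         for j2 in range(m):
--             if j1 == j2:
--                 dp[n-1][j1][j2] = grid[n-1][j1]
--             else:
--                 dp[n-1][j1][j2] = grid[n-1][j1] + grid[n-1][j2]
--
--     for i in range(n-2, -1, -1):
--         for j1 in range(m):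
--             for j2 in range(m):
--                 maxi = 0
--                 for d1 in [-1, 0, 1]:
--                     for d2 in [-1, 0, 1]:
--                         nj1 = j1 + d1
--                         nj2 = j2 + d2
--
--                         if 0 <= nj1 < m and 0 <= nj2 < m:
--                             val = dp[i+1][nj1][nj2]
--                             if j1 == j2:
--                                 val += grid[i][j1]
--                             else:
--                                 val += grid[i][j1] + grid[i][j2]
--                             maxi = max(maxi, val)
--
--                 dp[i][j1][j2] = maxi
--
--     return dp[0][0][m-1]
-- ===== SOURCE B (Python) =====
-- def maxChocolate(grid):
--     n = len(grid)
--     m = len(grid[0])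
--     memo = {}
--
--     def dfs(i, j1, j2):
--         if j1 == j2:
--             cur = grid[i][j1]
--         else:
--             cur = grid[i][j1] + grid[i][j2]
--         if i == n - 1:
--             return cur
--         key = (i, j1, j2)
--         if key in memo:
--             return memo[key]
--         best = None
--         for a in range(max(0, j1 - 1), min(m, j1 + 2)):
--             for b in range(max(0, j2 - 1), min(m, j2 + 2)):
--                 v = dfs(i + 1, a, b)
--                 if best is None or v > best:
--                     best = v
--         res = max(0, cur + best)
--         memo[key] = res
--         return res
--
--     return dfs(0, 0, m - 1)
-- ===== Notes on version B (the rewrite author's own statement) =====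
-- stated objective: alternative
-- what changed: Replaces A's bottom-up tabulation over a preallocated n*m*m table by a demand-driven top-down recursion dfs(i, j1, j2) memoized in a dict, started from (0, 0, m-1), so only reachable states are ever computed.
import Mathlib
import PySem

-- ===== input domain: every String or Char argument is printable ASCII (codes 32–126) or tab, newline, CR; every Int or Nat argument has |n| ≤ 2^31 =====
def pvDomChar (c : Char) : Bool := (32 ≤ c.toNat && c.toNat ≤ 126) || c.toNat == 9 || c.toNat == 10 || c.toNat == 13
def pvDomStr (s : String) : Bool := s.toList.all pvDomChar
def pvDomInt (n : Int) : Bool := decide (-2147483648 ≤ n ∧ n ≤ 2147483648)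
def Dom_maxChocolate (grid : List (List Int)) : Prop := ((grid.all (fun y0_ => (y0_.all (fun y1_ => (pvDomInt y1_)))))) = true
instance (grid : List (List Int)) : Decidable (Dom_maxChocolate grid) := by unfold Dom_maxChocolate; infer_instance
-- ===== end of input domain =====

-- B replaces A's bottom-up tabulation over a preallocated n×m×m table by a
-- demand-driven top-down recursion dfs(i, j1, j2) memoized in a dict, started
-- from (0, 0, m-1) (objective: alternative decomposition; same cost).

-- ===== PORT A =====
-- Python `dp[i][j1][j2] = v` (in-place triple assignment; all indices in range under Pre_)
def pvSetCell (dp : List (List (List Int))) (i j1 j2 : Nat) (v : Int) : List (List (List Int)) :=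
  dp.set i ((dp.getD i []).set j1 (((dp.getD i []).getD j1 []).set j2 v))

-- A's inner 3×3 delta scan with bounds checks; `nxt` is dp[i+1], `row` is grid[i]
-- (hoisted common subexpressions of the Python body; reads/values are identical).
def pvMaxiA (nxt : List (List Int)) (row : List Int) (m j1 j2 : Nat) : Int :=
  ([-1, 0, 1] : List Int).foldl (fun maxi d1 =>
    ([-1, 0, 1] : List Int).foldl (fun maxi d2 =>
      let nj1 : Int := (j1 : Int) + d1
      let nj2 : Int := (j2 : Int) + d2
      if (0 ≤ nj1 ∧ nj1 < (m : Int)) ∧ (0 ≤ nj2 ∧ nj2 < (m : Int)) then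
        -- val = dp[i+1][nj1][nj2]; then val += the current-row chocolate(s)
        let v0 := (nxt.getD nj1.toNat []).getD nj2.toNat 0
        max maxi (if j1 = j2 then v0 + row.getD j1 0
                  else v0 + (row.getD j1 0 + row.getD j2 0))
      else maxi) maxi) 0

-- getD-with-default transliterates Python indexing: every index is in range under Pre_.
def maxChocolate (grid : List (List Int)) : Int :=
  let n := grid.length
  let m := (grid.getD 0 []).length    -- len(grid[0]); Pre_ excludes the empty grid (Python IndexError)
  let dp0 := List.replicate n (List.replicate m (List.replicate m (-1 : Int)))
  -- base row n-1
  let dp1 := (List.range m).foldl (fun dp j1 =>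
      (List.range m).foldl (fun dp j2 =>
        pvSetCell dp (n-1) j1 j2
          (if j1 = j2 then (grid.getD (n-1) []).getD j1 0
           else (grid.getD (n-1) []).getD j1 0 + (grid.getD (n-1) []).getD j2 0)) dp) dp0
  -- Python's range(n-2, -1, -1) = [n-2, …, 0] = (List.range (n-1)).reverse
  let dp2 := ((List.range (n-1)).reverse).foldl (fun dp i =>
      (List.range m).foldl (fun dp j1 =>
        (List.range m).foldl (fun dp j2 =>
          pvSetCell dp i j1 j2 (pvMaxiA (dp.getD (i+1) []) (grid.getD i []) m j1 j2)) dp) dp) dp1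
  ((dp2.getD 0 []).getD 0 []).getD (m-1) 0

-- ===== PORT B =====
-- cur = grid[i][j1] if j1 == j2 else grid[i][j1] + grid[i][j2]   (indices in range under Pre_)
def pvPair (row : List Int) (j1 j2 : Nat) : Int :=
  if j1 = j2 then row.getD j1 0 else row.getD j1 0 + row.getD j2 0

-- Python range(max(0, j-1), min(m, j+2)); Nat subtraction j-1 IS max(0, j-1) since j ≥ 0
def pvNbr (m j : Nat) : List Nat := List.range' (j - 1) (min m (j + 2) - (j - 1))

-- `if best is None or v > best: best = v` — fold step on the running Optional best
def pvOMax (o : Option Int) (v : Int) : Int :=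
  match o with
  | none => v
  | some x => max x v

-- Source B's dfs. Python recurses on i with the base case `i == n-1`; here the
-- decreasing argument is fuel = (n-1) - i, so fuel = 0 IS `i == n-1` on every
-- reachable call (a faithful structural encoding of the same recursion).
-- The memo dict is threaded through the 3×3 neighbour loop together with `best`.
def pvDfsB (grid : List (List Int)) (m : Nat) :
    Nat → Nat → Nat → Nat → PySem.Dict (Nat × Nat × Nat) Int →
    Int × PySem.Dict (Nat × Nat × Nat) Int
  | 0, i, j1, j2, memo => (pvPair (grid.getD i []) j1 j2, memo)
  | fuel+1, i, j1, j2, memo =>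
      let cur := pvPair (grid.getD i []) j1 j2
      match memo.get? (i, j1, j2) with
      | some v => (v, memo)
      | none =>
          let st := (pvNbr m j1).foldl
            (fun (st : Option Int × PySem.Dict (Nat × Nat × Nat) Int) a =>
              (pvNbr m j2).foldl
                (fun st b =>
                  let r := pvDfsB grid m fuel (i+1) a b st.2
                  (some (pvOMax st.1 r.1), r.2))
                st)
            (none, memo)
          -- best is never None here: the stay-move column is always in range
          let res := max 0 (cur + st.1.getD 0)
          (res, st.2.insert (i, j1, j2) res)

def maxChocolate_alt (grid : List (List Int)) : Int :=
  let n := grid.length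
  let m := (grid.getD 0 []).length
  (pvDfsB grid m (n - 1) 0 0 (m - 1) PySem.Dict.empty).1

-- ===== PRECONDITION & SPEC =====
-- Pre_ = exactly where Python A returns: a nonempty grid, a nonempty first row, and every
-- row at least as long as the first (otherwise grid[0] / grid[i][j] / dp[0][0] raise IndexError).
def Pre_maxChocolate (grid : List (List Int)) : Prop :=
  grid ≠ [] ∧ 1 ≤ (grid.headD []).length ∧ ∀ row ∈ grid, (grid.headD []).length ≤ row.length
instance (grid : List (List Int)) : Decidable (Pre_maxChocolate grid) := by
  unfold Pre_maxChocolate; infer_instance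

def pvWitness_maxChocolate : List (List Int) := [[1, 2], [3, 4]]

def Spec_maxChocolate (grid : List (List Int)) (out : Int) : Prop := out = maxChocolate_alt grid
instance (grid : List (List Int)) (out : Int) : Decidable (Spec_maxChocolate grid out) := by
  unfold Spec_maxChocolate; infer_instance

-- ===== CLAIM (what is proved, stated in full; the proofs are below) =====
def Claim_equal_maxChocolate : Prop := ∀ (grid : List (List Int)), Dom_maxChocolate grid →
  Pre_maxChocolate grid → Spec_maxChocolate grid (maxChocolate grid)

-- ===== LEMMAS AND PROOFS =====
-- Proof plan: both ports are shown equal to the same pure recursion pvPure m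
-- (the value of the suffix of rows from i on, at column pair (j1, j2)).
-- A side: the old tabulation argument (A's dp sweep computes pvChain, whose
-- entries are pvPure). B side: a memo-soundness invariant for the dict.

def pvBestB (cur : List (List Int)) (m j1 j2 : Nat) : Int :=
  (PySem.List.max? ((pvNbr m j1).flatMap (fun a =>
      (pvNbr m j2).map (fun b => (cur.getD a []).getD b 0))) (fun y => y)).getD 0

def pvStep (m : Nat) (cur : List (List Int)) (row : List Int) : List (List Int) :=
  (List.range m).map (fun j1 => (List.range m).map (fun j2 =>
    max 0 (pvBestB cur m j1 j2 + pvPair row j1 j2)))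

def pvBase (m : Nat) (row : List Int) : List (List Int) :=
  (List.range m).map (fun j1 => (List.range m).map (fun j2 => pvPair row j1 j2))

-- the value table for a (nonempty) suffix of rows, as structural recursion
def pvChain (m : Nat) : List (List Int) → List (List Int)
  | [] => []
  | [r] => pvBase m r
  | r :: r' :: rs => pvStep m (pvChain m (r' :: rs)) r

-- the same values cell-wise, as a pure recursion (B's dfs without the memo)
def pvPure (m : Nat) : List (List Int) → Nat → Nat → Int
  | [], _, _ => 0
  | [r], j1, j2 => pvPair r j1 j2
  | r :: r' :: rs, j1, j2 =>
      max 0 (pvPair r j1 j2 +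
        (PySem.List.max? ((pvNbr m j1).flatMap (fun a =>
            (pvNbr m j2).map (fun b => pvPure m (r' :: rs) a b))) (fun y => y)).getD 0)

theorem pv_mem_nbr_lt (m j a : Nat) (h : a ∈ pvNbr m j) : a < m := by
  simp only [pvNbr, List.mem_range'] at h
  omega

theorem pv_nbr_ne_nil (m j : Nat) (hj : j < m) : pvNbr m j ≠ [] := by
  simp [pvNbr]
  omega

theorem pv_foldl_guard_filterMap {α β : Type} (c : α → Prop) [DecidablePred c] (g : α → β)
    (h : Int → β → Int) :
    ∀ (ds : List α) (acc : Int),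
      ds.foldl (fun a d => if c d then h a (g d) else a) acc
        = (ds.filterMap (fun d => if c d then some (g d) else none)).foldl h acc := by
  intro ds
  induction ds with
  | nil => intro acc; rfl
  | cons d ds ih => intro acc; by_cases hc : c d <;> simp [hc, ih]

theorem pv_pull_guard {α : Type} (P : Prop) [Decidable P] (c : α → Prop) [DecidablePred c]
    (h : Int → α → Int) (ds : List α) (acc : Int) :
    ds.foldl (fun a d => if P ∧ c d then h a d else a) acc
      = if P then ds.foldl (fun a d => if c d then h a d else a) acc else acc := by
  by_cases hP : P
  · simp [hP]
  · simp [hP]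

theorem pv_foldl_flatMap {α β γ : Type} (k : α → List β) (h : γ → β → γ) :
    ∀ (l : List α) (acc : γ),
      (l.flatMap k).foldl h acc = l.foldl (fun a x => (k x).foldl h a) acc := by
  intro l
  induction l with
  | nil => intro acc; rfl
  | cons x l ih => intro acc; simp [List.foldl_append, ih]

-- valid-delta columns = clamped range
theorem pv_validCols_eq (m j : Nat) (hj : j < m) :
    (([-1, 0, 1] : List Int).filterMap (fun d =>
        if 0 ≤ (j : Int) + d ∧ (j : Int) + d < (m : Int) then some ((j : Int) + d).toNat
        else none)) = pvNbr m j := by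
  simp only [List.filterMap_cons, List.filterMap_nil]
  by_cases hj1 : 1 ≤ j
  · rw [if_pos (by constructor <;> omega), if_pos (by constructor <;> omega)]
    by_cases hjm : j + 1 < m
    · rw [if_pos (by constructor <;> omega)]
      have : min m (j + 2) - (j - 1) = 3 := by omega
      simp [pvNbr, this, List.range']
      omega
    · rw [if_neg (by omega)]
      have : min m (j + 2) - (j - 1) = 2 := by omega
      simp [pvNbr, this, List.range']
      omega
  · rw [if_neg (by omega), if_pos (by constructor <;> omega)]
    by_cases hjm : j + 1 < m
    · rw [if_pos (by constructor <;> omega)]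
      have : min m (j + 2) - (j - 1) = 2 := by omega
      simp [pvNbr, this, List.range']
      omega
    · rw [if_neg (by omega)]
      have : min m (j + 2) - (j - 1) = 1 := by omega
      simp [pvNbr, this]
      omega

theorem pv_set_getD_self {α : Type} (l : List α) (i : Nat) (d : α) (h : i < l.length) :
    l.set i (l.getD i d) = l := by
  apply List.ext_getElem?
  intro j
  rw [List.getElem?_set]
  by_cases h1 : i = j
  · subst h1
    rw [if_pos rfl, if_pos h, List.getD_eq_getElem?_getD, List.getElem?_eq_getElem h]
    rfl
  · rw [if_neg h1]

theorem pv_getD_set {α : Type} (l : List α) (i t : Nat) (v : α) (d : α) :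
    (l.set i v).getD t d = if i = t ∧ t < l.length then v else l.getD t d := by
  rw [List.getD_eq_getElem?_getD, List.getD_eq_getElem?_getD, List.getElem?_set]
  by_cases h1 : i = t
  · subst h1
    by_cases h2 : i < l.length
    · rw [if_pos rfl, if_pos h2, if_pos ⟨rfl, h2⟩]; rfl
    · rw [if_pos rfl, if_neg h2, if_neg (by omega), List.getElem?_eq_none (by omega)]
  · rw [if_neg h1, if_neg (by tauto)]

theorem pv_foldl_set_length {α : Type} (V : Nat → α) :
    ∀ (js : List Nat) (l0 : List α),
      (js.foldl (fun l j => l.set j (V j)) l0).length = l0.length := by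
  intro js
  induction js with
  | nil => intro l0; rfl
  | cons j js ih => intro l0; simp [ih]

theorem pv_foldl_set_getD {α : Type} (V : Nat → α) (d : α) :
    ∀ (k a : Nat) (l0 : List α) (t : Nat),
      ((List.range' a k).foldl (fun l j => l.set j (V j)) l0).getD t d
        = if a ≤ t ∧ t < a + k ∧ t < l0.length then V t else l0.getD t d := by
  intro k
  induction k with
  | zero => intro a l0 t; rw [if_neg (by omega)]; rfl
  | succ k ih =>
    intro a l0 t
    rw [List.range'_succ, List.foldl_cons, ih (a+1) (l0.set a (V a)) t]
    rw [List.length_set, pv_getD_set]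
    split_ifs <;> first | rfl | omega | simp_all

theorem pv_fill_line {α : Type} (V : Nat → α) (d : α) (m : Nat) (l0 : List α)
    (h : l0.length = m) :
    (List.range m).foldl (fun l j => l.set j (V j)) l0 = (List.range m).map V := by
  apply List.ext_getElem
  · rw [pv_foldl_set_length, h, List.length_map, List.length_range]
  · intro t ht1 ht2
    have hlen : ((List.range m).foldl (fun l j => l.set j (V j)) l0).length = m := by
      rw [pv_foldl_set_length, h]
    have ht : t < m := by rw [hlen] at ht1; exact ht1
    have hc := pv_foldl_set_getD V d m 0 l0 t
    rw [← List.range_eq_range'] at hc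
    rw [if_pos ⟨by omega, by omega, by omega⟩] at hc
    rw [← List.getD_eq_getElem _ d ht1, hc]
    simp

theorem pvSetCell_length (dp : List (List (List Int))) (i j1 j2 : Nat) (v : Int) :
    (pvSetCell dp i j1 j2 v).length = dp.length := List.length_set

theorem pvSetCell_getD_ne (dp : List (List (List Int))) (i j1 j2 : Nat) (v : Int) (k : Nat)
    (hk : k ≠ i) : (pvSetCell dp i j1 j2 v).getD k [] = dp.getD k [] := by
  rw [pvSetCell, pv_getD_set, if_neg (by tauto)]

theorem pv_inner_row (i j1 : Nat) (W : Nat → Int) :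
    ∀ (js2 : List Nat) (dp : List (List (List Int))),
      i < dp.length → j1 < (dp.getD i []).length →
      js2.foldl (fun dp j2 => pvSetCell dp i j1 j2 (W j2)) dp
        = dp.set i ((dp.getD i []).set j1
            (js2.foldl (fun l j2 => l.set j2 (W j2)) ((dp.getD i []).getD j1 []))) := by
  intro js2
  induction js2 with
  | nil =>
    intro dp hi hj1
    simp only [List.foldl_nil]
    rw [pv_set_getD_self _ _ _ hj1, pv_set_getD_self _ _ _ hi]
  | cons j2 js2 ih =>
    intro dp hi hj1
    simp only [List.foldl_cons]
    have hi' : i < (pvSetCell dp i j1 j2 (W j2)).length := by rw [pvSetCell_length]; exact hi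
    have hgd : (pvSetCell dp i j1 j2 (W j2)).getD i []
        = (dp.getD i []).set j1 (((dp.getD i []).getD j1 []).set j2 (W j2)) := by
      rw [pvSetCell, pv_getD_set, if_pos ⟨rfl, hi⟩]
    have hj1' : j1 < ((pvSetCell dp i j1 j2 (W j2)).getD i []).length := by
      rw [hgd, List.length_set]; exact hj1
    rw [ih _ hi' hj1', hgd]
    rw [pvSetCell, List.set_set, List.set_set]
    rw [pv_getD_set, if_pos ⟨rfl, hj1⟩]

theorem pv_outer_row (i m : Nat) (V : Nat → Nat → Int) :
    ∀ (js1 : List Nat) (dp : List (List (List Int))),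
      i < dp.length → (∀ j1 ∈ js1, j1 < (dp.getD i []).length) →
      js1.foldl (fun dp j1 =>
          (List.range m).foldl (fun dp j2 => pvSetCell dp i j1 j2 (V j1 j2)) dp) dp
        = dp.set i (js1.foldl (fun r j1 =>
            r.set j1 ((List.range m).foldl (fun l j2 => l.set j2 (V j1 j2)) (r.getD j1 [])))
            (dp.getD i [])) := by
  intro js1
  induction js1 with
  | nil =>
    intro dp hi _
    simp only [List.foldl_nil]
    rw [pv_set_getD_self _ _ _ hi]
  | cons j1 js1 ih =>
    intro dp hi hmem
    simp only [List.foldl_cons]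
    rw [pv_inner_row i j1 (V j1) _ dp hi (hmem j1 (by simp))]
    set X := (dp.getD i []).set j1
      ((List.range m).foldl (fun l j2 => l.set j2 (V j1 j2)) ((dp.getD i []).getD j1 [])) with hX
    have hi' : i < (dp.set i X).length := by rw [List.length_set]; exact hi
    have hgd : (dp.set i X).getD i [] = X := by rw [pv_getD_set, if_pos ⟨rfl, hi⟩]
    have hmem' : ∀ j ∈ js1, j < ((dp.set i X).getD i []).length := by
      intro j hj
      rw [hgd, hX, List.length_set]
      exact hmem j (by simp [hj])
    rw [ih _ hi' hmem', hgd, List.set_set]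

theorem pv_rows_fold (m : Nat) (V : Nat → Nat → Int) :
    ∀ (js1 : List Nat) (r : List (List Int)), (∀ x ∈ r, x.length = m) →
      js1.foldl (fun r j1 =>
          r.set j1 ((List.range m).foldl (fun l j2 => l.set j2 (V j1 j2)) (r.getD j1 []))) r
        = js1.foldl (fun r j1 => r.set j1 ((List.range m).map (V j1))) r := by
  intro js1
  induction js1 with
  | nil => intro r _; rfl
  | cons j1 js1 ih =>
    intro r hr
    simp only [List.foldl_cons]
    by_cases hj : j1 < r.length
    · have hmem : r.getD j1 [] ∈ r := by
        rw [List.getD_eq_getElem _ _ hj]; exact List.getElem_mem hj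
      rw [pv_fill_line (V j1) 0 m _ (hr _ hmem)]
      apply ih
      intro x hx
      rcases List.mem_or_eq_of_mem_set hx with h | h
      · exact hr x h
      · subst h; simp
    · rw [List.set_eq_of_length_le (by omega), List.set_eq_of_length_le (by omega)]
      exact ih r hr

theorem pv_row_update (i m : Nat) (V : Nat → Nat → Int) (dp : List (List (List Int)))
    (hi : i < dp.length)
    (hrow : dp.getD i [] = List.replicate m (List.replicate m (-1 : Int))) :
    (List.range m).foldl (fun dp j1 =>
        (List.range m).foldl (fun dp j2 => pvSetCell dp i j1 j2 (V j1 j2)) dp) dp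
      = dp.set i ((List.range m).map (fun j1 => (List.range m).map (V j1))) := by
  rw [pv_outer_row i m V _ dp hi (by rw [hrow]; simp [List.mem_range])]
  rw [hrow, pv_rows_fold m V _ _ (by intro x hx; simp_all [List.eq_of_mem_replicate hx])]
  congr 1
  exact pv_fill_line (fun j1 => (List.range m).map (V j1)) [] m _ (by simp)

theorem pv_fold_setCell_getD_ne (i j1 k : Nat) (hk : k ≠ i) (W : Nat → Int) :
    ∀ (js2 : List Nat) (dp : List (List (List Int))),
      (js2.foldl (fun dp j2 => pvSetCell dp i j1 j2 (W j2)) dp).getD k []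
        = dp.getD k [] := by
  intro js2
  induction js2 with
  | nil => intro dp; rfl
  | cons j2 js2 ih => intro dp; rw [List.foldl_cons, ih, pvSetCell_getD_ne _ _ _ _ _ _ hk]

theorem pv_fix_inner (i j1 : Nat) (F : List (List Int) → Nat → Nat → Int)
    (N : List (List Int)) :
    ∀ (js2 : List Nat) (dp : List (List (List Int))), dp.getD (i+1) [] = N →
      js2.foldl (fun dp j2 => pvSetCell dp i j1 j2 (F (dp.getD (i+1) []) j1 j2)) dp
        = js2.foldl (fun dp j2 => pvSetCell dp i j1 j2 (F N j1 j2)) dp := by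
  intro js2
  induction js2 with
  | nil => intro dp _; rfl
  | cons j2 js2 ih =>
    intro dp hN
    simp only [List.foldl_cons]
    rw [hN, ih _ (by rw [pvSetCell_getD_ne _ _ _ _ _ _ (by omega)]; exact hN)]

theorem pv_fix_outer (i m : Nat) (F : List (List Int) → Nat → Nat → Int)
    (N : List (List Int)) :
    ∀ (js1 : List Nat) (dp : List (List (List Int))), dp.getD (i+1) [] = N →
      js1.foldl (fun dp j1 => (List.range m).foldl (fun dp j2 =>
          pvSetCell dp i j1 j2 (F (dp.getD (i+1) []) j1 j2)) dp) dp
        = js1.foldl (fun dp j1 => (List.range m).foldl (fun dp j2 =>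
            pvSetCell dp i j1 j2 (F N j1 j2)) dp) dp := by
  intro js1
  induction js1 with
  | nil => intro dp _; rfl
  | cons j1 js1 ih =>
    intro dp hN
    simp only [List.foldl_cons]
    rw [pv_fix_inner i j1 F N _ dp hN]
    exact ih _ (by rw [pv_fold_setCell_getD_ne i j1 (i+1) (by omega)]; exact hN)

theorem pv_max_shift (p : Int) :
    ∀ (t : List Int) (x a : Int),
      t.foldl (fun acc v => max acc (v + p)) (max a (x + p)) = max a (t.foldl max x + p) := by
  intro t
  induction t with
  | nil => intro x a; rfl
  | cons y t ih =>
    intro x a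
    simp only [List.foldl_cons]
    rw [max_assoc, max_add_add_right, ih]

theorem pv_fold_max0 (p : Int) (vals : List Int) (hne : vals ≠ []) :
    vals.foldl (fun a v => max a (v + p)) 0
      = max 0 ((PySem.List.max? vals (fun y => y)).getD 0 + p) := by
  cases vals with
  | nil => exact absurd rfl hne
  | cons x t =>
    rw [PySem.List.max?_id_cons]
    simp only [List.foldl_cons, Option.getD_some]
    exact pv_max_shift p t x 0

theorem pv_cell_eq (nxt : List (List Int)) (row : List Int) (m j1 j2 : Nat)
    (h1 : j1 < m) (h2 : j2 < m) :
    pvMaxiA nxt row m j1 j2 = max 0 (pvBestB nxt m j1 j2 + pvPair row j1 j2) := by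
  have hval : ∀ v0 : Int,
      (if j1 = j2 then v0 + row.getD j1 0 else v0 + (row.getD j1 0 + row.getD j2 0))
        = v0 + pvPair row j1 j2 := by
    intro v0; by_cases h : j1 = j2 <;> simp [pvPair, h]
  have step1 : pvMaxiA nxt row m j1 j2 =
      ([-1, 0, 1] : List Int).foldl (fun maxi d1 =>
        if (0 ≤ (j1 : Int) + d1 ∧ (j1 : Int) + d1 < (m : Int)) then
          ([-1, 0, 1] : List Int).foldl (fun maxi d2 =>
            if (0 ≤ (j2 : Int) + d2 ∧ (j2 : Int) + d2 < (m : Int)) then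
              max maxi ((nxt.getD ((j1 : Int) + d1).toNat []).getD ((j2 : Int) + d2).toNat 0
                + pvPair row j1 j2)
            else maxi) maxi
        else maxi) 0 := by
    simp only [pvMaxiA, hval]
    refine List.foldl_ext _ _ _ (fun acc d1 _ => ?_)
    exact pv_pull_guard _ _ _ _ acc
  rw [step1]
  rw [pv_foldl_guard_filterMap (fun d1 => 0 ≤ (j1 : Int) + d1 ∧ (j1 : Int) + d1 < (m : Int))
      (fun d1 => ((j1 : Int) + d1).toNat)
      (fun acc a => ([-1, 0, 1] : List Int).foldl (fun maxi d2 =>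
        if (0 ≤ (j2 : Int) + d2 ∧ (j2 : Int) + d2 < (m : Int)) then
          max maxi ((nxt.getD a []).getD ((j2 : Int) + d2).toNat 0 + pvPair row j1 j2)
        else maxi) acc)]
  rw [pv_validCols_eq m j1 h1]
  have step2 : ∀ (a : Nat) (acc : Int),
      ([-1, 0, 1] : List Int).foldl (fun maxi d2 =>
        if (0 ≤ (j2 : Int) + d2 ∧ (j2 : Int) + d2 < (m : Int)) then
          max maxi ((nxt.getD a []).getD ((j2 : Int) + d2).toNat 0 + pvPair row j1 j2)
        else maxi) acc
      = (pvNbr m j2).foldl (fun maxi b =>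
          max maxi ((nxt.getD a []).getD b 0 + pvPair row j1 j2)) acc := by
    intro a acc
    rw [pv_foldl_guard_filterMap (fun d2 => 0 ≤ (j2 : Int) + d2 ∧ (j2 : Int) + d2 < (m : Int))
        (fun d2 => ((j2 : Int) + d2).toNat)
        (fun maxi b => max maxi ((nxt.getD a []).getD b 0 + pvPair row j1 j2))]
    rw [pv_validCols_eq m j2 h2]
  have step3 := List.foldl_ext
    (fun (acc : Int) (a : Nat) => ([-1, 0, 1] : List Int).foldl (fun maxi d2 =>
        if (0 ≤ (j2 : Int) + d2 ∧ (j2 : Int) + d2 < (m : Int)) then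
          max maxi ((nxt.getD a []).getD ((j2 : Int) + d2).toNat 0 + pvPair row j1 j2)
        else maxi) acc)
    (fun (acc : Int) (a : Nat) => (pvNbr m j2).foldl (fun maxi b =>
          max maxi ((nxt.getD a []).getD b 0 + pvPair row j1 j2)) acc)
    0 (l := pvNbr m j1) (fun acc a _ => step2 a acc)
  rw [step3]
  have step4 : (pvNbr m j1).foldl (fun (acc : Int) (a : Nat) => (pvNbr m j2).foldl (fun maxi b =>
          max maxi ((nxt.getD a []).getD b 0 + pvPair row j1 j2)) acc) 0
      = ((pvNbr m j1).flatMap (fun a =>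
          (pvNbr m j2).map (fun b => (nxt.getD a []).getD b 0))).foldl
          (fun acc v => max acc (v + pvPair row j1 j2)) 0 := by
    rw [pv_foldl_flatMap]
    refine List.foldl_ext _ _ _ (fun acc a _ => ?_)
    rw [List.foldl_map]
  rw [step4]
  rw [pv_fold_max0 _ _ ?hne]
  · rfl
  case hne =>
    simp only [ne_eq, List.flatMap_eq_nil_iff, not_forall]
    refine ⟨(pvNbr m j1).head (pv_nbr_ne_nil m j1 h1), List.head_mem _, ?_⟩
    simp [pv_nbr_ne_nil m j2 h2]

-- loop invariant for A's bottom-up sweep: rows below i are still the -1 scratch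
-- rows, rows from i on already hold the value tables for the corresponding suffix.
def pvInv (grid : List (List Int)) (m i : Nat) (dp : List (List (List Int))) : Prop :=
  dp.length = grid.length ∧
  (∀ k, k < i → dp.getD k [] = List.replicate m (List.replicate m (-1 : Int))) ∧
  (∀ k, i ≤ k → k < grid.length → dp.getD k [] = pvChain m (grid.drop k))

theorem pv_step_table (grid : List (List Int)) (m q : Nat) (hq : q + 1 < grid.length)
    (N : List (List Int)) (hN : N = pvChain m (grid.drop (q+1))) :
    (List.range m).map (fun j1 => (List.range m).map (fun j2 =>
        pvMaxiA N (grid.getD q []) m j1 j2))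
      = pvChain m (grid.drop q) := by
  have hdrop : grid.drop q = grid.getD q [] :: grid.drop (q+1) := by
    rw [List.drop_eq_getElem_cons (by omega), List.getD_eq_getElem _ _ (by omega)]
  have hmap : (List.range m).map (fun j1 => (List.range m).map (fun j2 =>
      pvMaxiA N (grid.getD q []) m j1 j2)) = pvStep m N (grid.getD q []) := by
    apply List.map_congr_left
    intro j1 hj1
    apply List.map_congr_left
    intro j2 hj2
    exact pv_cell_eq N _ m j1 j2 (List.mem_range.mp hj1) (List.mem_range.mp hj2)
  rw [hmap, hdrop]
  have hlen : (grid.drop (q+1)).length = grid.length - (q+1) := List.length_drop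
  cases hd : grid.drop (q+1) with
  | nil => rw [hd] at hlen; simp at hlen; omega
  | cons r' rs' => rw [hd] at hN; rw [hN, pvChain]

theorem pv_loop (grid : List (List Int)) (m : Nat) :
    ∀ (q : Nat) (dp : List (List (List Int))), q + 1 ≤ grid.length → pvInv grid m q dp →
      pvInv grid m 0 (((List.range q).reverse).foldl (fun dp i =>
        (List.range m).foldl (fun dp j1 => (List.range m).foldl (fun dp j2 =>
          pvSetCell dp i j1 j2
            (pvMaxiA (dp.getD (i+1) []) (grid.getD i []) m j1 j2)) dp) dp) dp) := by
  intro q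
  induction q with
  | zero => intro dp _ h; simpa using h
  | succ q ih =>
    intro dp hq hInv
    obtain ⟨hlen, hlow, hhigh⟩ := hInv
    have hrev : (List.range (q+1)).reverse = q :: (List.range q).reverse := by
      simp [List.range_succ]
    rw [hrev, List.foldl_cons]
    have hN : dp.getD (q+1) [] = pvChain m (grid.drop (q+1)) :=
      hhigh (q+1) (le_refl _) (by omega)
    apply ih _ (by omega)
    rw [pv_fix_outer q m (fun nxt j1 j2 => pvMaxiA nxt (grid.getD q []) m j1 j2)
        (dp.getD (q+1) []) (List.range m) dp rfl]
    rw [pv_row_update q m _ dp (by omega) (hlow q (by omega))]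
    rw [hN, pv_step_table grid m q (by omega) _ rfl]
    refine ⟨by rw [List.length_set]; exact hlen, ?_, ?_⟩
    · intro k hk
      rw [pv_getD_set, if_neg (by omega)]
      exact hlow k (by omega)
    · intro k hk1 hk2
      by_cases hkq : k = q
      · subst hkq
        rw [pv_getD_set, if_pos ⟨rfl, by omega⟩]
      · rw [pv_getD_set, if_neg (by omega)]
        exact hhigh k (by omega) hk2

theorem pv_A_eq_chain (grid : List (List Int)) (hne : grid ≠ []) :
    maxChocolate grid
      = ((pvChain (grid.getD 0 []).length grid).getD 0 []).getD
          ((grid.getD 0 []).length - 1) 0 := by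
  have hn : 1 ≤ grid.length := List.length_pos_of_ne_nil hne
  unfold maxChocolate
  dsimp only
  set n := grid.length with hn_def
  set m := (grid.getD 0 []).length with hm_def
  set dp0 := List.replicate n (List.replicate m (List.replicate m (-1 : Int))) with hdp0
  have hdp0len : dp0.length = n := by simp [hdp0]
  have hdp0get : ∀ k, k < n → dp0.getD k [] = List.replicate m (List.replicate m (-1:Int)) := by
    intro k hk
    simp [hdp0, List.getD_eq_getElem?_getD, hk]
  have hchainlast : pvChain m (grid.drop (n-1)) = pvBase m (grid.getD (n-1) []) := by
    have hl : n - 1 < grid.length := by omega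
    rw [List.drop_eq_getElem_cons hl,
        List.drop_eq_nil_of_le (by omega), List.getD_eq_getElem _ _ hl]
    rfl
  have hbase := pv_row_update (n-1) m
      (fun j1 j2 => if j1 = j2 then (grid.getD (n-1) []).getD j1 0
        else (grid.getD (n-1) []).getD j1 0 + (grid.getD (n-1) []).getD j2 0)
      dp0 (by omega) (hdp0get _ (by omega))
  have hbaseT : (List.range m).map (fun j1 => (List.range m).map
      ((fun j1 j2 => if j1 = j2 then (grid.getD (n-1) []).getD j1 0
        else (grid.getD (n-1) []).getD j1 0 + (grid.getD (n-1) []).getD j2 0) j1))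
      = pvBase m (grid.getD (n-1) []) := rfl
  rw [hbase, hbaseT, ← hchainlast]
  have hInv1 : pvInv grid m (n-1) (dp0.set (n-1) (pvChain m (grid.drop (n-1)))) := by
    refine ⟨by rw [List.length_set]; exact hdp0len, ?_, ?_⟩
    · intro k hk
      rw [pv_getD_set, if_neg (by omega)]
      exact hdp0get k (by omega)
    · intro k hk1 hk2
      have : k = n - 1 := by omega
      subst this
      rw [pv_getD_set, if_pos ⟨rfl, by omega⟩]
  have hInv0 := pv_loop grid m (n-1) _ (by omega) hInv1
  obtain ⟨-, -, hhigh⟩ := hInv0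
  have h0 := hhigh 0 (by omega) (by omega)
  rw [List.drop_zero] at h0
  rw [h0]

-- chain entries ARE the pure recursion
theorem pv_chain_entry (m : Nat) :
    ∀ (g : List (List Int)), g ≠ [] → ∀ (j1 j2 : Nat), j1 < m → j2 < m →
      ((pvChain m g).getD j1 []).getD j2 0 = pvPure m g j1 j2 := by
  intro g
  induction g with
  | nil => intro h; exact absurd rfl h
  | cons r rs ih =>
    intro _ j1 j2 h1 h2
    cases rs with
    | nil =>
      simp [pvChain, pvPure, pvBase, List.getD_eq_getElem?_getD, h1, h2]
    | cons r' rs' =>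
      have hentry : ((pvStep m (pvChain m (r' :: rs')) r).getD j1 []).getD j2 0
          = max 0 (pvBestB (pvChain m (r' :: rs')) m j1 j2 + pvPair r j1 j2) := by
        simp [pvStep, List.getD_eq_getElem?_getD, h1, h2]
      rw [pvChain, hentry]
      have hbb : pvBestB (pvChain m (r' :: rs')) m j1 j2
          = (PySem.List.max? ((pvNbr m j1).flatMap (fun a =>
              (pvNbr m j2).map (fun b => pvPure m (r' :: rs') a b))) (fun y => y)).getD 0 := by
        unfold pvBestB
        congr 1
        congr 1
        apply List.flatMap_congr  -- pointwise equality of the inner lists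
        intro a ha
        apply List.map_congr_left
        intro b hb
        exact ih (by simp) a b (pv_mem_nbr_lt m j1 a ha) (pv_mem_nbr_lt m j2 b hb)
      rw [hbb, pvPure]
      rw [Int.add_comm]

-- ============ B side: the memoised dfs computes pvPure ============

def pvMemoOK (grid : List (List Int)) (m : Nat)
    (memo : PySem.Dict (Nat × Nat × Nat) Int) : Prop :=
  ∀ i j1 j2 v, memo.get? (i, j1, j2) = some v → v = pvPure m (grid.drop i) j1 j2

theorem pv_optfold_some (L : List Int) :
    ∀ (x : Int), L.foldl (fun o v => some (pvOMax o v)) (some x) = some (L.foldl max x) := by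
  induction L with
  | nil => intro x; rfl
  | cons y t ih => intro x; simpa [pvOMax] using ih (max x y)

theorem pv_optfold_max? (L : List Int) (hne : L ≠ []) :
    L.foldl (fun o v => some (pvOMax o v)) none = PySem.List.max? L (fun y => y) := by
  cases L with
  | nil => exact absurd rfl hne
  | cons x t =>
    rw [PySem.List.max?_id_cons, List.foldl_cons]
    exact pv_optfold_some t x

theorem pv_dfs_inner (grid : List (List Int)) (m fuel i : Nat) (a : Nat) (ha : a < m)
    (IH : ∀ (a b : Nat) (mm : PySem.Dict (Nat × Nat × Nat) Int), a < m → b < m →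
      pvMemoOK grid m mm →
      (pvDfsB grid m fuel (i+1) a b mm).1 = pvPure m (grid.drop (i+1)) a b ∧
      pvMemoOK grid m (pvDfsB grid m fuel (i+1) a b mm).2) :
    ∀ (bs : List Nat), (∀ b ∈ bs, b < m) →
      ∀ (st : Option Int × PySem.Dict (Nat × Nat × Nat) Int), pvMemoOK grid m st.2 →
      pvMemoOK grid m ((bs.foldl (fun st b =>
          (some (pvOMax st.1 (pvDfsB grid m fuel (i+1) a b st.2).1),
            (pvDfsB grid m fuel (i+1) a b st.2).2)) st)).2 ∧
      (bs.foldl (fun st b =>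
          (some (pvOMax st.1 (pvDfsB grid m fuel (i+1) a b st.2).1),
            (pvDfsB grid m fuel (i+1) a b st.2).2)) st).1
        = bs.foldl (fun o b => some (pvOMax o (pvPure m (grid.drop (i+1)) a b))) st.1 := by
  intro bs
  induction bs with
  | nil => intro _ st hst; exact ⟨hst, rfl⟩
  | cons b bs ih =>
    intro hbs st hst
    simp only [List.foldl_cons]
    obtain ⟨hv, hm⟩ := IH a b st.2 ha (hbs b (by simp)) hst
    have hrec := ih (fun b hb => hbs b (by simp [hb]))
      (some (pvOMax st.1 (pvDfsB grid m fuel (i+1) a b st.2).1),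
        (pvDfsB grid m fuel (i+1) a b st.2).2) hm
    refine ⟨hrec.1, ?_⟩
    rw [hrec.2]
    simp only [hv]

theorem pv_dfs_outer (grid : List (List Int)) (m fuel i : Nat) (j2 : Nat)
    (IH : ∀ (a b : Nat) (mm : PySem.Dict (Nat × Nat × Nat) Int), a < m → b < m →
      pvMemoOK grid m mm →
      (pvDfsB grid m fuel (i+1) a b mm).1 = pvPure m (grid.drop (i+1)) a b ∧
      pvMemoOK grid m (pvDfsB grid m fuel (i+1) a b mm).2) :
    ∀ (as_ : List Nat), (∀ a ∈ as_, a < m) →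
      ∀ (st : Option Int × PySem.Dict (Nat × Nat × Nat) Int), pvMemoOK grid m st.2 →
      pvMemoOK grid m ((as_.foldl (fun st a => (pvNbr m j2).foldl (fun st b =>
          (some (pvOMax st.1 (pvDfsB grid m fuel (i+1) a b st.2).1),
            (pvDfsB grid m fuel (i+1) a b st.2).2)) st) st)).2 ∧
      (as_.foldl (fun st a => (pvNbr m j2).foldl (fun st b =>
          (some (pvOMax st.1 (pvDfsB grid m fuel (i+1) a b st.2).1),
            (pvDfsB grid m fuel (i+1) a b st.2).2)) st) st).1
        = as_.foldl (fun o a => (pvNbr m j2).foldl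
            (fun o b => some (pvOMax o (pvPure m (grid.drop (i+1)) a b))) o) st.1 := by
  intro as_
  induction as_ with
  | nil => intro _ st hst; exact ⟨hst, rfl⟩
  | cons a as_ ih =>
    intro has st hst
    simp only [List.foldl_cons]
    obtain ⟨hm1, hv1⟩ := pv_dfs_inner grid m fuel i a (has a (by simp)) IH (pvNbr m j2)
      (fun b hb => pv_mem_nbr_lt m j2 b hb) st hst
    obtain ⟨hm2, hv2⟩ := ih (fun a ha => has a (by simp [ha])) _ hm1
    refine ⟨hm2, ?_⟩
    rw [hv2, hv1]

-- the nested option-fold over neighbours equals the option-fold over the flatMap list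
theorem pv_optfold_nested (f : Nat → Nat → Int) (as_ : List Nat) (bs : List Nat) :
    ∀ (o : Option Int),
      as_.foldl (fun o a => bs.foldl (fun o b => some (pvOMax o (f a b))) o) o
        = (as_.flatMap (fun a => bs.map (f a))).foldl (fun o v => some (pvOMax o v)) o := by
  intro o
  rw [pv_foldl_flatMap]
  refine List.foldl_ext _ _ _ (fun o a _ => ?_)
  rw [List.foldl_map]

-- main B lemma: with a sound memo and fuel = n-1-i, dfs returns the pure value
theorem pv_dfs_correct (grid : List (List Int)) (m : Nat) :
    ∀ (fuel i j1 j2 : Nat) (memo : PySem.Dict (Nat × Nat × Nat) Int),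
      i + fuel + 1 = grid.length → j1 < m → j2 < m → pvMemoOK grid m memo →
      (pvDfsB grid m fuel i j1 j2 memo).1 = pvPure m (grid.drop i) j1 j2 ∧
      pvMemoOK grid m (pvDfsB grid m fuel i j1 j2 memo).2 := by
  intro fuel
  induction fuel with
  | zero =>
    intro i j1 j2 memo hn hj1 hj2 hOK
    have hdrop : grid.drop i = [grid.getD i []] := by
      rw [List.drop_eq_getElem_cons (by omega), List.getD_eq_getElem _ _ (by omega),
          List.drop_eq_nil_of_le (by omega)]
    rw [hdrop]
    exact ⟨rfl, hOK⟩
  | succ fuel ih =>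
    intro i j1 j2 memo hn hj1 hj2 hOK
    have hdrop : grid.drop i = grid.getD i [] :: grid.drop (i+1) := by
      rw [List.drop_eq_getElem_cons (by omega), List.getD_eq_getElem _ _ (by omega)]
    have hlen1 : (grid.drop (i+1)).length = grid.length - (i+1) := List.length_drop
    obtain ⟨r', rs', hd1⟩ : ∃ r' rs', grid.drop (i+1) = r' :: rs' := by
      cases hx : grid.drop (i+1) with
      | nil => rw [hx] at hlen1; simp at hlen1; omega
      | cons r' rs' => exact ⟨r', rs', rfl⟩
    have hpure : pvPure m (grid.drop i) j1 j2
        = max 0 (pvPair (grid.getD i []) j1 j2 +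
            (PySem.List.max? ((pvNbr m j1).flatMap (fun a =>
              (pvNbr m j2).map (fun b => pvPure m (grid.drop (i+1)) a b))) (fun y => y)).getD 0) := by
      rw [hdrop, hd1, pvPure, ← hd1]
    have IH : ∀ (a b : Nat) (mm : PySem.Dict (Nat × Nat × Nat) Int), a < m → b < m →
        pvMemoOK grid m mm →
        (pvDfsB grid m fuel (i+1) a b mm).1 = pvPure m (grid.drop (i+1)) a b ∧
        pvMemoOK grid m (pvDfsB grid m fuel (i+1) a b mm).2 := by
      intro a b mm ha hb hmm
      exact ih (i+1) a b mm (by omega) ha hb hmm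
    cases hget : memo.get? (i, j1, j2) with
    | some v =>
      have hred : pvDfsB grid m (fuel+1) i j1 j2 memo = (v, memo) := by
        simp [pvDfsB, hget]
      rw [hred]
      exact ⟨hOK i j1 j2 v hget, hOK⟩
    | none =>
      simp only [pvDfsB, hget]
      obtain ⟨hmOK, hval⟩ := pv_dfs_outer grid m fuel i j2 IH (pvNbr m j1)
        (fun a ha => pv_mem_nbr_lt m j1 a ha) (none, memo) hOK
      set st := (pvNbr m j1).foldl (fun st a => (pvNbr m j2).foldl (fun st b =>
          (some (pvOMax st.1 (pvDfsB grid m fuel (i+1) a b st.2).1),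
            (pvDfsB grid m fuel (i+1) a b st.2).2)) st)
          ((none : Option Int), memo) with hst
      have hLne : ((pvNbr m j1).flatMap (fun a =>
          (pvNbr m j2).map (fun b => pvPure m (grid.drop (i+1)) a b))) ≠ [] := by
        simp only [ne_eq, List.flatMap_eq_nil_iff, not_forall]
        refine ⟨(pvNbr m j1).head (pv_nbr_ne_nil m j1 hj1), List.head_mem _, ?_⟩
        simp [pv_nbr_ne_nil m j2 hj2]
      have hst1 : st.1 = PySem.List.max? ((pvNbr m j1).flatMap (fun a =>
          (pvNbr m j2).map (fun b => pvPure m (grid.drop (i+1)) a b))) (fun y => y) := by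
        rw [hst, hval, pv_optfold_nested, pv_optfold_max? _ hLne]
      have hres : max 0 (pvPair (grid.getD i []) j1 j2 + st.1.getD 0)
          = pvPure m (grid.drop i) j1 j2 := by
        rw [hst1, hpure]
      constructor
      · exact hres
      · -- memo after insert stays sound
        intro i' j1' j2' v hv
        rw [PySem.Dict.get?_insert] at hv
        by_cases hk : (i', j1', j2') = (i, j1, j2)
        · rw [if_pos hk] at hv
          simp only [Prod.mk.injEq] at hk
          obtain ⟨rfl, rfl, rfl⟩ := hk
          rw [← Option.some.inj hv]
          exact hres
        · rw [if_neg hk] at hv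
          exact hmOK i' j1' j2' v hv

theorem pv_B_eq_pure (grid : List (List Int)) (hne : grid ≠ [])
    (hm : 1 ≤ (grid.getD 0 []).length) :
    maxChocolate_alt grid
      = pvPure (grid.getD 0 []).length grid 0 ((grid.getD 0 []).length - 1) := by
  have hn : 1 ≤ grid.length := List.length_pos_of_ne_nil hne
  have hOK : pvMemoOK grid (grid.getD 0 []).length PySem.Dict.empty := by
    intro i j1 j2 v hv
    rw [PySem.Dict.get?_empty] at hv
    exact absurd hv (by simp)
  have := pv_dfs_correct grid (grid.getD 0 []).length (grid.length - 1) 0 0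
    ((grid.getD 0 []).length - 1) PySem.Dict.empty (by omega) (by omega) (by omega) hOK
  unfold maxChocolate_alt
  rw [this.1, List.drop_zero]

theorem pv_A_eq_pure (grid : List (List Int)) (hne : grid ≠ [])
    (hm : 1 ≤ (grid.getD 0 []).length) :
    maxChocolate grid
      = pvPure (grid.getD 0 []).length grid 0 ((grid.getD 0 []).length - 1) := by
  rw [pv_A_eq_chain grid hne]
  exact pv_chain_entry _ grid hne 0 _ (by omega) (by omega)

-- ===== VERDICT (by name: the statement is the Claim_ definition above) =====
theorem maxChocolate_spec : Claim_equal_maxChocolate := by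
  intro grid _ hpre
  unfold Spec_maxChocolate
  have hh : (grid.headD []) = grid.getD 0 [] := by cases grid <;> rfl
  have hm : 1 ≤ (grid.getD 0 []).length := by rw [← hh]; exact hpre.2.1
  rw [pv_A_eq_pure grid hpre.1 hm, pv_B_eq_pure grid hpre.1 hm]
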